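-- pv_equiv track=rewrite | github.com/lsankar4033/programming_gym | leetcode/sentence_screen_fitting/run.py | num_sentences
-- ===== SOURCE A (Python) =====
-- def num_sentences(sentence, rows, cols):
--     word_lengths = [len(w) for w in sentence]
--     if any(l > cols for l in word_lengths):
--         return 0
--
--     num_sentences_so_far = 0
--     cur_word = 0
--     for _ in range(rows):
--         col = 0
--
--         while (col + word_lengths[cur_word] <= cols):
--             col += word_lengths[cur_word] + 1
--             cur_word += 1
--             if cur_word == len(word_lengths):
--                 cur_word = 0
--                 num_sentences_so_far += 1
--
--     return num_sentences_so_far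
-- ===== SOURCE B (Python) =====
-- def num_sentences(sentence, rows, cols):
--     lengths = [len(w) for w in sentence]
--     if any(l > cols for l in lengths):
--         return 0
--     if not lengths or rows <= 0:
--         return 0
--     n = len(lengths)
--     # prefix[j] = cost (length + one space) of the first j words; T = cost of the whole sentence
--     prefix = [0]
--     for l in lengths:
--         prefix.append(prefix[-1] + l + 1)
--     T = prefix[n]
--     # closed form for one row starting at word i with budget cols+1:
--     # sentences completed = (prefix[i]+cols+1) // T; next start = largest j with prefix[j] <= remainder
--     cnt = [0] * n
--     nxt = [0] * n
--     for i in range(n):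
--         z = prefix[i] + cols + 1
--         cnt[i] = z // T
--         r = z % T
--         lo, hi = 0, n - 1
--         while lo < hi:
--             mid = (lo + hi + 1) // 2
--             if prefix[mid] <= r:
--                 lo = mid
--             else:
--                 hi = mid - 1
--         nxt[i] = lo
--     total, cur = 0, 0
--     for _ in range(rows):
--         total += cnt[cur]
--         cur = nxt[cur]
--     return total
-- ===== Notes on version B (the rewrite author's own statement) =====
-- stated objective: faster
-- what changed: B replaces A's word-by-word simulation of every row by prefix sums of word costs: per start index one closed-form division (sentences completed) and one binary search (next start index), then each of the rows iterations is an O(1) table lookup instead of A's scan over the words that fit in the row.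
import Mathlib
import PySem

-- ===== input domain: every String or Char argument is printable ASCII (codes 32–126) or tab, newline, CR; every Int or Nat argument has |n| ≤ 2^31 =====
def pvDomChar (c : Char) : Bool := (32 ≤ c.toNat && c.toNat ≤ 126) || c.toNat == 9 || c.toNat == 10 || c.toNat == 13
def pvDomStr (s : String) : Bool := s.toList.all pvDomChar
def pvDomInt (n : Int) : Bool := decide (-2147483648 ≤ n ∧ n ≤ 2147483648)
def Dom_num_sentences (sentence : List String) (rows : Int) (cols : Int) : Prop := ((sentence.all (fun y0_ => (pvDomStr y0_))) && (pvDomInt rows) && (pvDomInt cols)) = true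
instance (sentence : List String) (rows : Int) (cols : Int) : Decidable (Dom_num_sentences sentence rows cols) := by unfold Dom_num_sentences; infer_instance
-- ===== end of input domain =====

-- B replaces A's word-by-word simulation of every row by prefix sums of word costs: one closed-form
-- division plus a binary search per distinct start index, then O(1) table lookups per row; proved
-- equal to A on every input where A returns (Pre_ excludes only the empty sentence with rows ≥ 1,
-- where A raises IndexError).

-- ===== PORT A =====
-- A's inner `while`: state (col, cur_word, num_sentences_so_far).  The `while` runs at most
-- cols.toNat + 1 times (col starts at 0, strictly increases, and the guard needs col ≤ cols),
-- so with fuel cols.toNat + 1 the fuel-exhausted branch is unreachable while the guard holds;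
-- it returns the same state the failing guard would, so the transcription is exact.
-- word_lengths[cur_word] is in range whenever A does not raise (cur_word < n is an invariant
-- proved below), so `getD` is exact there.
def pvInnerA (wl : List Nat) (cols : Int) : Nat → Nat → Nat → Nat → Nat × Nat
  | 0, _, cur, ns => (cur, ns)
  | fuel + 1, col, cur, ns =>
    if (col : Int) + (wl.getD cur 0 : Int) ≤ cols then
      if cur + 1 = wl.length then pvInnerA wl cols fuel (col + wl.getD cur 0 + 1) 0 (ns + 1)
      else pvInnerA wl cols fuel (col + wl.getD cur 0 + 1) (cur + 1) ns
    else (cur, ns)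

def num_sentences (sentence : List String) (rows : Int) (cols : Int) : Int :=
  let wl : List Nat := sentence.map (fun w => w.toList.length)
  if wl.any (fun l => (l : Int) > cols) then 0
  else
    let st := (List.range rows.toNat).foldl
      (fun (st : Nat × Nat) _ => pvInnerA wl cols (cols.toNat + 1) 0 st.1 st.2) (0, 0)
    (st.2 : Int)

-- ===== PORT B =====
-- Source B's prefix-building loop: prefix[-1] is PySem.List.pyGetD ps (-1) 0 (exact Python negative index)
def pvBuild (wl : List Nat) : List Nat :=
  wl.foldl (fun ps l => ps ++ [PySem.List.pyGetD ps (-1) 0 + l + 1]) [0]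

-- Source B's hand-written binary search: largest j in [lo, hi] with prefix[j] <= r.
-- Each iteration shrinks hi - lo by at least 1, so fuel hi - lo suffices and the
-- fuel-exhausted branch is unreachable while lo < hi: the transcription is exact.
def pvBsearch (P : List Nat) (r : Int) : Nat → Nat → Nat → Nat
  | 0, lo, _ => lo
  | fuel + 1, lo, hi =>
    if lo < hi then
      let mid := (lo + hi + 1) / 2
      if (P.getD mid 0 : Int) ≤ r then pvBsearch P r fuel mid hi
      else pvBsearch P r fuel lo (mid - 1)
    else lo

-- Source B's per-start table: for each i, (sentences completed in a row starting at word i, next start)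
def pvRowTbl (P : List Nat) (n : Nat) (cols : Int) : List (Int × Nat) :=
  (List.range n).map (fun i =>
    let T : Int := (P.getD n 0 : Int)
    let z : Int := (P.getD i 0 : Int) + cols + 1
    (PySem.Int.floordiv z T, pvBsearch P (PySem.Int.mod z T) (n - 1) 0 (n - 1)))

def num_sentences_alt (sentence : List String) (rows : Int) (cols : Int) : Int :=
  let lengths : List Nat := sentence.map (fun w => w.toList.length)
  if lengths.any (fun l => (l : Int) > cols) then 0
  else if lengths.isEmpty || rows ≤ 0 then 0
  else
    let tbl := pvRowTbl (pvBuild lengths) lengths.length cols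
    -- cur stays in [0, lengths.length), so plain list indexing via getD is exact
    let st := (List.range rows.toNat).foldl
      (fun (st : Int × Nat) _ =>
        let p := tbl.getD st.2 (0, 0)
        (st.1 + p.1, p.2)) ((0 : Int), (0 : Nat))
    st.1

-- ===== PRECONDITION & SPEC =====
-- Pre_ excludes exactly the inputs on which A raises IndexError (empty sentence with rows ≥ 1,
-- via word_lengths[cur_word] on the empty list); A returns on every other input.
def Pre_num_sentences (sentence : List String) (rows : Int) (cols : Int) : Prop :=
  sentence ≠ [] ∨ rows ≤ 0
instance (sentence : List String) (rows : Int) (cols : Int) : Decidable (Pre_num_sentences sentence rows cols) := by unfold Pre_num_sentences; infer_instance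
def pvWitness_num_sentences : List String × Int × Int := (["ab", "c"], 3, 5)

def Spec_num_sentences (sentence : List String) (rows : Int) (cols : Int) (out : Int) : Prop := out = num_sentences_alt sentence rows cols
instance (sentence : List String) (rows : Int) (cols : Int) (out : Int) : Decidable (Spec_num_sentences sentence rows cols out) := by unfold Spec_num_sentences; infer_instance

-- ===== CLAIM (what is proved, stated in full; the proofs are below) =====
def Claim_equal_num_sentences : Prop := ∀ (sentence : List String) (rows : Int) (cols : Int), Dom_num_sentences sentence rows cols → Pre_num_sentences sentence rows cols → Spec_num_sentences sentence rows cols (num_sentences sentence rows cols)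

-- ===== LEMMAS AND PROOFS =====

-- pvPf wl j = cost (length + one trailing space) of the first j words
def pvPf (wl : List Nat) (j : Nat) : Nat := ((wl.take j).map (fun l => l + 1)).sum

lemma pvPf_succ (wl : List Nat) (j : Nat) (hj : j < wl.length) :
    pvPf wl (j + 1) = pvPf wl j + wl.getD j 0 + 1 := by
  induction wl generalizing j with
  | nil => simp at hj
  | cons a wl ih =>
    cases j with
    | zero => simp [pvPf]
    | succ j =>
      simp only [List.length_cons, Nat.add_lt_add_iff_right] at hj
      simp only [pvPf, List.take_succ_cons, List.map_cons, List.sum_cons, List.getD_cons_succ]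
      rw [show ((wl.take (j+1)).map (fun l => l + 1)).sum = pvPf wl (j+1) from rfl,
          show ((wl.take j).map (fun l => l + 1)).sum = pvPf wl j from rfl, ih j hj]
      omega

lemma pvPf_mono (wl : List Nat) {j k : Nat} (h : j ≤ k) : pvPf wl j ≤ pvPf wl k := by
  induction wl generalizing j k with
  | nil => simp [pvPf]
  | cons a wl ih =>
    cases j with
    | zero => simp [pvPf]
    | succ j =>
      cases k with
      | zero => omega
      | succ k =>
        simp only [pvPf, List.take_succ_cons, List.map_cons, List.sum_cons]
        have h2 : pvPf wl j ≤ pvPf wl k := ih (by omega)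
        simp only [pvPf] at h2
        omega

lemma pvBuild_eq (wl : List Nat) :
    pvBuild wl = (List.range (wl.length + 1)).map (pvPf wl) := by
  induction wl using List.reverseRecOn with
  | nil => simp [pvBuild, pvPf]
  | append_singleton wl l ih =>
    have hstep : pvBuild (wl ++ [l])
        = pvBuild wl ++ [PySem.List.pyGetD (pvBuild wl) (-1) 0 + l + 1] := by
      simp [pvBuild, List.foldl_append]
    have hlast : PySem.List.pyGetD (pvBuild wl) (-1) 0 = pvPf wl wl.length := by
      rw [ih, List.range_succ, List.map_append, List.map_singleton,
          PySem.List.pyGetD_neg_one_append_singleton]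
    have hpre : ∀ j, j ≤ wl.length → pvPf (wl ++ [l]) j = pvPf wl j := by
      intro j hj
      simp [pvPf, List.take_append_of_le_length hj]
    have hfull : pvPf (wl ++ [l]) (wl.length + 1) = pvPf wl wl.length + (l + 1) := by
      simp [pvPf, List.take_of_length_le]
    rw [hstep, hlast, ih]
    rw [show (wl ++ [l]).length + 1 = (wl.length + 1) + 1 by simp]
    rw [List.range_succ (n := wl.length + 1), List.map_append, List.map_singleton, hfull]
    congr 1
    apply List.map_congr_left
    intro j hj
    exact (hpre j (by simpa using Nat.lt_succ_iff.mp (List.mem_range.mp hj))).symm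

lemma pvBuild_getD (wl : List Nat) (j : Nat) (hj : j ≤ wl.length) :
    (pvBuild wl).getD j 0 = pvPf wl j := by
  rw [pvBuild_eq, List.getD_eq_getElem?_getD]
  simp [Nat.lt_succ_of_le hj]

lemma pvBsearch_spec (P : List Nat) (r : Int) :
    ∀ (d lo hi : Nat), hi - lo ≤ d → lo ≤ hi → (P.getD lo 0 : Int) ≤ r →
    lo ≤ pvBsearch P r d lo hi ∧ pvBsearch P r d lo hi ≤ hi ∧
      (P.getD (pvBsearch P r d lo hi) 0 : Int) ≤ r ∧
      (pvBsearch P r d lo hi = hi ∨ r < (P.getD (pvBsearch P r d lo hi + 1) 0 : Int)) := by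
  intro d
  induction d with
  | zero =>
    intro lo hi h1 h2 hlo
    have he : lo = hi := by omega
    rw [pvBsearch]
    exact ⟨le_refl _, by omega, hlo, Or.inl he⟩
  | succ d ih =>
    intro lo hi h1 h2 hlo
    rw [pvBsearch]
    by_cases hlh : lo < hi
    · rw [if_pos hlh]
      simp only
      by_cases hm : (P.getD ((lo + hi + 1) / 2) 0 : Int) ≤ r
      · rw [if_pos hm]
        have hrec := ih ((lo + hi + 1) / 2) hi (by omega) (by omega) hm
        exact ⟨by omega, hrec.2.1, hrec.2.2.1, hrec.2.2.2⟩
      · rw [if_neg hm]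
        have hrec := ih lo ((lo + hi + 1) / 2 - 1) (by omega) (by omega) hlo
        obtain ⟨c1, c2, c3, c4⟩ := hrec
        refine ⟨c1, by omega, c3, Or.inr ?_⟩
        rcases c4 with h | h
        · rw [h, show (lo + hi + 1) / 2 - 1 + 1 = (lo + hi + 1) / 2 by omega]
          omega
        · exact h
    · rw [if_neg hlh]
      have he : lo = hi := by omega
      exact ⟨le_refl _, by omega, hlo, Or.inl he⟩

lemma pvPf_unique (wl : List Nat) {j cur z : Nat} (hj : j < wl.length) (hcur : cur < wl.length)
    (h1 : pvPf wl j ≤ z) (h2 : z < pvPf wl (j + 1))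
    (h3 : pvPf wl cur ≤ z) (h4 : z < pvPf wl (cur + 1)) : j = cur := by
  by_contra hne
  rcases Nat.lt_or_ge j cur with h | h
  · have := pvPf_mono wl (show j + 1 ≤ cur by omega)
    omega
  · have := pvPf_mono wl (show cur + 1 ≤ j by omega)
    omega

-- A's inner loop in closed form: starting at word cur with budget cols - col, the row completes
-- z / T sentences and ends at the unique j with pvPf j ≤ z % T < pvPf (j+1), z = pvPf cur + budget + 1
lemma pvInnerA_char (wl : List Nat) (cols : Int) (hn : 0 < wl.length) :
    ∀ (fuel col cur ns j : Nat), cur < wl.length → j < wl.length →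
      -1 ≤ cols - (col : Int) → cols - (col : Int) < (fuel : Int) →
      pvPf wl j ≤ (pvPf wl cur + (cols - col + 1).toNat) % pvPf wl wl.length →
      (pvPf wl cur + (cols - col + 1).toNat) % pvPf wl wl.length < pvPf wl (j + 1) →
      pvInnerA wl cols fuel col cur ns
        = (j, ns + (pvPf wl cur + (cols - col + 1).toNat) / pvPf wl wl.length) := by
  intro fuel
  induction fuel with
  | zero =>
    intro col cur ns j hcur hj h1 h2 hlo hhi
    have hz : (cols - (col : Int) + 1).toNat = 0 := by omega
    have hsucc := pvPf_succ wl cur hcur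
    have hT : pvPf wl cur < pvPf wl wl.length := by
      have := pvPf_mono wl (show cur + 1 ≤ wl.length from hcur)
      omega
    rw [hz, Nat.add_zero, Nat.mod_eq_of_lt hT] at hlo hhi
    have hjcur : j = cur := by
      have hc4 : pvPf wl cur < pvPf wl (cur + 1) := by omega
      exact pvPf_unique wl hj hcur hlo hhi (le_refl _) hc4
    rw [pvInnerA, hz, Nat.add_zero, Nat.div_eq_of_lt hT, hjcur]
    simp
  | succ fuel ih =>
    intro col cur ns j hcur hj h1 h2 hlo hhi
    have hsucc := pvPf_succ wl cur hcur
    rw [pvInnerA]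
    by_cases hg : (col : Int) + (wl.getD cur 0 : Int) ≤ cols
    · rw [if_pos hg]
      by_cases hwrap : cur + 1 = wl.length
      · rw [if_pos hwrap]
        have hTcur : pvPf wl wl.length = pvPf wl cur + wl.getD cur 0 + 1 := by
          rw [← hwrap, hsucc]
        have hT : 0 < pvPf wl wl.length := by omega
        have h00 : pvPf wl 0 = 0 := by simp [pvPf]
        have hz' : pvPf wl cur + (cols - (col : Int) + 1).toNat
            = (pvPf wl 0 + (cols - ((col + wl.getD cur 0 + 1 : Nat) : Int) + 1).toNat)
              + pvPf wl wl.length := by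
          push_cast
          omega
        rw [hz', Nat.add_mod_right] at hlo hhi
        rw [hz', Nat.add_div_right _ hT]
        rw [ih (col + wl.getD cur 0 + 1) 0 (ns + 1) j hn hj (by push_cast; omega)
          (by push_cast; push_cast at h2; omega) hlo hhi]
        simp [Nat.add_assoc, Nat.add_comm 1]
      · rw [if_neg hwrap]
        have hz' : pvPf wl cur + (cols - (col : Int) + 1).toNat
            = pvPf wl (cur + 1) + (cols - ((col + wl.getD cur 0 + 1 : Nat) : Int) + 1).toNat := by
          rw [hsucc]
          push_cast
          omega
        rw [hz'] at hlo hhi ⊢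
        exact ih (col + wl.getD cur 0 + 1) (cur + 1) ns j (by omega) hj (by push_cast; omega)
          (by push_cast; push_cast at h2; omega) hlo hhi
    · rw [if_neg hg]
      have hzlt : pvPf wl cur + (cols - (col : Int) + 1).toNat < pvPf wl (cur + 1) := by omega
      have hzT : pvPf wl cur + (cols - (col : Int) + 1).toNat < pvPf wl wl.length := by
        have := pvPf_mono wl (show cur + 1 ≤ wl.length from hcur)
        omega
      rw [Nat.mod_eq_of_lt hzT] at hlo hhi
      have hjcur : j = cur :=
        pvPf_unique wl hj hcur hlo hhi (Nat.le_add_right _ _) hzlt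
      rw [Nat.div_eq_of_lt hzT, hjcur]
      simp

-- proof-side abbreviations for the two row folds (definitionally the ports' loops)
def pvFoldA (wl : List Nat) (cols : Int) (k : Nat) : Nat × Nat :=
  (List.range k).foldl (fun st _ => pvInnerA wl cols (cols.toNat + 1) 0 st.1 st.2) (0, 0)

def pvFoldB (wl : List Nat) (cols : Int) (k : Nat) : Int × Nat :=
  (List.range k).foldl
    (fun st _ =>
      let p := (pvRowTbl (pvBuild wl) wl.length cols).getD st.2 (0, 0)
      (st.1 + p.1, p.2)) ((0 : Int), (0 : Nat))

lemma getD_map_range {A : Type} (f : Nat → A) (n i : Nat) (d : A) (hi : i < n) :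
    ((List.range n).map f).getD i d = f i := by
  rw [List.getD_eq_getElem?_getD]
  simp [hi]

-- one row of A equals one table lookup of B
lemma row_eq (wl : List Nat) (cols : Int) (hn : 0 < wl.length) (hcols : 0 ≤ cols)
    (cur ns : Nat) (hcur : cur < wl.length) :
    ∃ (c j : Nat), j < wl.length ∧
      (pvRowTbl (pvBuild wl) wl.length cols).getD cur (0, 0) = ((c : Int), j) ∧
      pvInnerA wl cols (cols.toNat + 1) 0 cur ns = (j, ns + c) := by
  have hTbl : (pvRowTbl (pvBuild wl) wl.length cols).getD cur (0, 0)
      = (PySem.Int.floordiv ((( pvBuild wl).getD cur 0 : Int) + cols + 1) (((pvBuild wl).getD wl.length 0 : Int)),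
         pvBsearch (pvBuild wl) (PySem.Int.mod (((pvBuild wl).getD cur 0 : Int) + cols + 1) (((pvBuild wl).getD wl.length 0 : Int))) (wl.length - 1) 0 (wl.length - 1)) := by
    unfold pvRowTbl
    rw [getD_map_range _ _ _ _ hcur]
  have hPcur : (pvBuild wl).getD cur 0 = pvPf wl cur := pvBuild_getD wl cur (le_of_lt hcur)
  have hPn : (pvBuild wl).getD wl.length 0 = pvPf wl wl.length := pvBuild_getD wl wl.length (le_refl _)
  have hsucc0 := pvPf_succ wl 0 hn
  have h00 : pvPf wl 0 = 0 := by simp [pvPf]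
  have hT : 0 < pvPf wl wl.length := by
    have := pvPf_mono wl (show 0 + 1 ≤ wl.length from hn)
    omega
  have hzcast : ((pvBuild wl).getD cur 0 : Int) + cols + 1
      = ((pvPf wl cur + cols.toNat + 1 : Nat) : Int) := by
    rw [hPcur]
    push_cast
    omega
  set zN := pvPf wl cur + cols.toNat + 1 with hzN
  have hflo : PySem.Int.floordiv (((pvBuild wl).getD cur 0 : Int) + cols + 1) (((pvBuild wl).getD wl.length 0 : Int))
      = ((zN / pvPf wl wl.length : Nat) : Int) := by
    rw [hzcast, hPn]
    exact PySem.Int.floordiv_natCast zN (pvPf wl wl.length)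
  have hmod : PySem.Int.mod (((pvBuild wl).getD cur 0 : Int) + cols + 1) (((pvBuild wl).getD wl.length 0 : Int))
      = ((zN % pvPf wl wl.length : Nat) : Int) := by
    rw [hzcast, hPn]
    exact PySem.Int.mod_natCast zN (pvPf wl wl.length)
  set r : Int := ((zN % pvPf wl wl.length : Nat) : Int) with hr
  have hspec := pvBsearch_spec (pvBuild wl) r (wl.length - 1) 0 (wl.length - 1) (by omega)
    (Nat.zero_le _) (by rw [pvBuild_getD wl 0 (Nat.zero_le _), h00]; positivity)
  set j := pvBsearch (pvBuild wl) r (wl.length - 1) 0 (wl.length - 1) with hj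
  obtain ⟨_, hjle, hjr, hjnext⟩ := hspec
  have hjn : j < wl.length := by omega
  have hlo : pvPf wl j ≤ zN % pvPf wl wl.length := by
    rw [pvBuild_getD wl j (le_of_lt hjn), hr] at hjr
    exact_mod_cast hjr
  have hhi : zN % pvPf wl wl.length < pvPf wl (j + 1) := by
    rcases hjnext with hend | hlt
    · have : j + 1 = wl.length := by omega
      rw [this]
      exact Nat.mod_lt _ hT
    · rw [pvBuild_getD wl (j + 1) (by omega), hr] at hlt
      exact_mod_cast hlt
  have hchar := pvInnerA_char wl cols hn (cols.toNat + 1) 0 cur ns j hcur hjn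
    (by push_cast; omega) (by push_cast; omega)
  have hztn : pvPf wl cur + (cols - ((0 : Nat) : Int) + 1).toNat = zN := by
    rw [hzN]
    push_cast
    omega
  rw [hztn] at hchar
  refine ⟨zN / pvPf wl wl.length, j, hjn, ?_, hchar hlo hhi⟩
  rw [hTbl, hflo, hmod]

-- proof-side step lemmas for the two row folds
lemma pvFoldA_succ (wl : List Nat) (cols : Int) (k : Nat) :
    pvFoldA wl cols (k + 1)
      = pvInnerA wl cols (cols.toNat + 1) 0 (pvFoldA wl cols k).1 (pvFoldA wl cols k).2 := by
  unfold pvFoldA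
  rw [List.range_succ, List.foldl_append]
  rfl

lemma pvFoldB_succ (wl : List Nat) (cols : Int) (k : Nat) :
    pvFoldB wl cols (k + 1)
      = ((pvFoldB wl cols k).1 + ((pvRowTbl (pvBuild wl) wl.length cols).getD (pvFoldB wl cols k).2 (0, 0)).1,
         ((pvRowTbl (pvBuild wl) wl.length cols).getD (pvFoldB wl cols k).2 (0, 0)).2) := by
  unfold pvFoldB
  rw [List.range_succ, List.foldl_append]
  rfl

lemma main_fold (wl : List Nat) (cols : Int) (hn : 0 < wl.length) (hcols : 0 ≤ cols) (k : Nat) :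
    (pvFoldB wl cols k).2 = (pvFoldA wl cols k).1 ∧
    (pvFoldB wl cols k).1 = ((pvFoldA wl cols k).2 : Int) ∧
    (pvFoldA wl cols k).1 < wl.length := by
  induction k with
  | zero => exact ⟨rfl, rfl, hn⟩
  | succ k ih =>
    obtain ⟨h1, h2, h3⟩ := ih
    obtain ⟨c, j, hjn, htbl, hrow⟩ := row_eq wl cols hn hcols (pvFoldA wl cols k).1 (pvFoldA wl cols k).2 h3
    rw [pvFoldA_succ, pvFoldB_succ, h1, htbl, hrow]
    refine ⟨rfl, ?_, hjn⟩
    rw [h2]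
    push_cast
    ring

-- ===== VERDICT (by name: the statement is the Claim_ definition above) =====
theorem num_sentences_spec : Claim_equal_num_sentences := by
  intro sentence rows cols _ hpre
  unfold Spec_num_sentences num_sentences num_sentences_alt
  dsimp only
  split
  · rfl
  · rename_i h
    try rw [if_neg h]
    by_cases hrow : rows ≤ 0
    · rw [if_pos (by simp [hrow])]
      rw [Int.toNat_of_nonpos hrow]
      simp
    · have hne : sentence ≠ [] := by
        rcases hpre with h' | h'
        · exact h'
        · exact absurd h' hrow
      rw [if_neg (by simp [hrow, hne])]
      have hn : 0 < (sentence.map (fun w => w.toList.length)).length := by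
        simp only [List.length_map]
        exact List.length_pos_of_ne_nil hne
      have hcols : 0 ≤ cols := by
        obtain ⟨l, hl⟩ := List.exists_mem_of_ne_nil _ (List.ne_nil_of_length_pos hn)
        by_contra hneg
        exact h (List.any_eq_true.mpr ⟨l, hl, by simp; omega⟩)
      exact ((main_fold (sentence.map (fun w => w.toList.length)) cols hn hcols rows.toNat).2.1).symm
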